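-- pv_equiv track=rewrite | github.com/sstevens2/sstevens_pubscrip | parse_phylosift_sts.py | checkrank
-- ===== SOURCE A (Python) =====
-- def checkrank(list2check, rank): #checks that all the makers have that rank, returns list of markers to remove
-- 	missmarklist=[]
-- 	rankmatchlist=[]
-- 	for line in list2check:
-- 		if (line[3] == rank):
-- 			rankmatchlist.append(line[1])
-- 	for line in list2check:
-- 		if (line[1] not in rankmatchlist) and (line[1] not in missmarklist):
-- 			missmarklist.append(line[1])
-- 	return missmarklist
-- ===== SOURCE B (Python) =====
-- def checkrank(list2check, rank):
--     # one pass: ordered dict marker -> "has this rank somewhere", then emit the False ones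
--     has_rank = {}
--     for line in list2check:
--         has_rank[line[1]] = has_rank.get(line[1], False) | (line[3] == rank)
--     return [marker for marker, flag in has_rank.items() if not flag]
-- ===== Notes on version B (the rewrite author's own statement) =====
-- stated objective: alternative
-- what changed: Replaces A's two scans with inner list-membership tests by a single pass building an insertion-ordered dict marker->has_rank flag, then one pass over the distinct markers emitting those whose flag is False.
import Mathlib
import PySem

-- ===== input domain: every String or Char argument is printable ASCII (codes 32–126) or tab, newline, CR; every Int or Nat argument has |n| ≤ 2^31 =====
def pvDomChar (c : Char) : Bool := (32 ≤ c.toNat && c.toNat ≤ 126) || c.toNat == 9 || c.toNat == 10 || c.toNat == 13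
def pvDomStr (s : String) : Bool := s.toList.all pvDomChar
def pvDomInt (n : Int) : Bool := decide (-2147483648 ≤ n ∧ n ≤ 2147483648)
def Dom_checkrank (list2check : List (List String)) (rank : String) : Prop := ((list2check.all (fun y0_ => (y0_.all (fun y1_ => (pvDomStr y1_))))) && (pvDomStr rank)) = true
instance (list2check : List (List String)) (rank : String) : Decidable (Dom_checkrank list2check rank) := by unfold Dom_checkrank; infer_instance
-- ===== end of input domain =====

-- B replaces A's two scans with inner list-membership tests by one dict-building pass
-- (marker -> has-the-rank flag, first-appearance order) plus one pass over the distinct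
-- markers. Objective: alternative.

-- ===== PORT A =====
def checkrank (list2check : List (List String)) (rank : String) : List String :=
  let rankmatchlist : List String :=
    list2check.foldl (fun acc line =>
      if PySem.List.pyGetD line 3 "" == rank then acc ++ [PySem.List.pyGetD line 1 ""] else acc) []
  list2check.foldl (fun acc line =>
    if !(rankmatchlist.contains (PySem.List.pyGetD line 1 "")) && !(acc.contains (PySem.List.pyGetD line 1 "")) then
      acc ++ [PySem.List.pyGetD line 1 ""] else acc) []

-- ===== PORT B =====
def checkrank_alt (list2check : List (List String)) (rank : String) : List String :=
  let has_rank : PySem.Dict String Bool :=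
    list2check.foldl (fun d line =>
      d.modify (PySem.List.pyGetD line 1 "") false
        (fun b => b || (PySem.List.pyGetD line 3 "" == rank))) PySem.Dict.empty
  (has_rank.items.filter (fun kv => kv.2 == false)).map Prod.fst

-- ===== PRECONDITION & SPEC =====
-- Pre_ excludes exactly the inputs on which the Python A raises IndexError: a row with
-- fewer than 4 fields (line[3] or line[1] is out of range).
def Pre_checkrank (list2check : List (List String)) (rank : String) : Prop :=
  ∀ line ∈ list2check, 4 ≤ line.length
instance (list2check : List (List String)) (rank : String) : Decidable (Pre_checkrank list2check rank) := by unfold Pre_checkrank; infer_instance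

def pvWitness_checkrank : List (List String) × String :=
  ([["1", "m1", "x", "genus"], ["2", "m2", "y", "species"], ["3", "m1", "z", "species"]], "genus")

def Spec_checkrank (list2check : List (List String)) (rank : String) (out : List String) : Prop := out = checkrank_alt list2check rank
instance (list2check : List (List String)) (rank : String) (out : List String) : Decidable (Spec_checkrank list2check rank out) := by unfold Spec_checkrank; infer_instance

-- ===== CLAIM (what is proved, stated in full; the proofs are below) =====
def Claim_equal_checkrank : Prop := ∀ (list2check : List (List String)) (rank : String), Dom_checkrank list2check rank → Pre_checkrank list2check rank → Spec_checkrank list2check rank (checkrank list2check rank)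

-- ===== LEMMAS AND PROOFS =====

-- the marker of a row, and whether the row has the rank
def pvMark (line : List String) : String := PySem.List.pyGetD line 1 ""
def pvHit (rank : String) (line : List String) : Bool := PySem.List.pyGetD line 3 "" == rank

-- "some row with this marker has the rank", as both programs end up testing it
def pvAny (l : List (List String)) (rank : String) (m : String) : Bool :=
  l.any (fun line => pvMark line == m && pvHit rank line)

-- a conditional-add fold is Set.update with the list pre-filtered
theorem pv_foldl_add_if {α : Type} [BEq α] [LawfulBEq α] (q : α → Bool) :
    ∀ (xs : List α) (s : PySem.Set α),
      xs.foldl (fun s m => if q m then PySem.Set.add s m else s) s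
        = PySem.Set.update s (xs.filter q) := by
  intro xs
  induction xs with
  | nil => intro s; simp [PySem.Set.update]
  | cons x xs ih =>
    intro s
    by_cases h : q x = true
    · simp [List.foldl_cons, h, ih, PySem.Set.update_cons]
    · simp [List.foldl_cons, h, ih]

-- dedup-first commutes with filter
theorem pv_ofList_filter {α : Type} [BEq α] [LawfulBEq α] (p : α → Bool) (xs : List α) :
    PySem.Set.ofList (xs.filter p) = (PySem.Set.ofList xs).filter p := by
  induction xs using List.reverseRecOn with
  | nil => simp
  | append_singleton xs x ih =>
    by_cases hp : p x = true
    · rw [List.filter_append, List.filter_singleton, hp, cond_true]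
      rw [PySem.Set.ofList_append_singleton, PySem.Set.ofList_append_singleton]
      by_cases hm : x ∈ PySem.Set.ofList xs
      · rw [PySem.Set.add_of_mem hm, PySem.Set.add_of_mem, ih]
        rw [ih]; exact List.mem_filter.mpr ⟨by rwa [PySem.Set.mem_ofList] at hm ⊢, hp⟩
      · rw [PySem.Set.add_of_not_mem hm, PySem.Set.add_of_not_mem, List.filter_append,
          List.filter_singleton, hp, cond_true, ih]
        rw [ih]; intro hx; exact hm (List.mem_filter.mp hx).1
    · rw [Bool.not_eq_true] at hp
      rw [List.filter_append, List.filter_singleton, hp, cond_false, List.append_nil]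
      rw [PySem.Set.ofList_append_singleton]
      by_cases hm : x ∈ PySem.Set.ofList xs
      · rw [PySem.Set.add_of_mem hm, ih]
      · rw [PySem.Set.add_of_not_mem hm, List.filter_append, List.filter_singleton, hp,
          cond_false, List.append_nil, ih]

-- final flag for a marker = "some row with that marker has the rank"
theorem pv_getD_fold (rank : String) (m : String) :
    ∀ (l : List (List String)) (d : PySem.Dict String Bool),
      (l.foldl (fun d line =>
          d.modify (pvMark line) false (fun b => b || pvHit rank line)) d).getD m false
        = (d.getD m false || pvAny l rank m) := by
  intro l
  induction l with
  | nil => intro d; simp [pvAny]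
  | cons x l ih =>
    intro d
    rw [List.foldl_cons, ih, PySem.Dict.getD_modify]
    by_cases h : m = pvMark x
    · simp [pvAny, h, Bool.or_assoc, Bool.or_comm, Bool.or_left_comm]
    · have h' : (pvMark x == m) = false := beq_eq_false_iff_ne.mpr (fun hh => h hh.symm)
      simp [pvAny, h, h']

-- items of a dict with nodup keys, as a map over its keys
theorem pv_items_eq_keys_map {κ ν : Type} [BEq κ] [LawfulBEq κ]
    (d : PySem.Dict κ ν) (dflt : ν) (h : d.keys.Nodup) :
    d.items = d.keys.map (fun k => (k, d.getD k dflt)) := by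
  have h1 : d.keys.map (fun k => (k, d.getD k dflt))
      = d.items.map (fun p => (p.1, d.getD p.1 dflt)) := by
    simp only [PySem.Dict.keys, List.map_map]; rfl
  rw [h1]
  conv_lhs => rw [← List.map_id d.items]
  apply List.map_congr_left
  intro p hp
  have hg : d.getD p.1 dflt = p.2 :=
    PySem.Dict.getD_of_mem_items d (by rw [Prod.mk.eta]; exact hp) h dflt
  simp [hg]

-- A's result: the deduped markers, filtered by "no row with this marker has the rank"
theorem pv_A_char (l : List (List String)) (rank : String) :
    checkrank l rank
      = (PySem.Set.ofList (l.map pvMark)).filter (fun m => !(pvAny l rank m)) := by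
  unfold checkrank
  have hR : l.foldl (fun acc line =>
      if PySem.List.pyGetD line 3 "" == rank then acc ++ [PySem.List.pyGetD line 1 ""] else acc) []
      = (l.filter (pvHit rank)).map pvMark := by
    rw [PySem.List.foldl_append_if]; rfl
  rw [hR]
  have hcontains : ∀ m, ((l.filter (pvHit rank)).map pvMark).contains m = pvAny l rank m := by
    intro m
    rcases hb : pvAny l rank m with _ | _
    · rw [Bool.eq_false_iff]
      intro hc
      rw [List.contains_iff_mem, List.mem_map] at hc
      obtain ⟨line, hline, hm⟩ := hc
      rw [List.mem_filter] at hline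
      rw [Bool.eq_false_iff] at hb
      exact hb (by
        rw [pvAny, List.any_eq_true]
        exact ⟨line, hline.1, by simp [hm, hline.2]⟩)
    · rw [pvAny, List.any_eq_true] at hb
      obtain ⟨line, hline, hx⟩ := hb
      rw [Bool.and_eq_true, beq_iff_eq] at hx
      rw [List.contains_iff_mem, List.mem_map]
      exact ⟨line, List.mem_filter.mpr ⟨hline, hx.2⟩, hx.1⟩
  have hstep : l.foldl (fun acc line =>
      if !(((l.filter (pvHit rank)).map pvMark).contains (PySem.List.pyGetD line 1 "")) &&
         !(acc.contains (PySem.List.pyGetD line 1 "")) then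
        acc ++ [PySem.List.pyGetD line 1 ""] else acc) ([] : List String)
      = (l.map pvMark).foldl
          (fun s m => if !(pvAny l rank m) then PySem.Set.add s m else s) [] := by
    rw [List.foldl_map]
    apply PySem.List.foldl_congr_mem
    intro acc line _
    show (if !(((l.filter (pvHit rank)).map pvMark).contains (pvMark line)) &&
             !(acc.contains (pvMark line)) then acc ++ [pvMark line] else acc)
        = (if !(pvAny l rank (pvMark line)) then PySem.Set.add acc (pvMark line) else acc)
    rw [hcontains]
    rcases hr : pvAny l rank (pvMark line) with _ | _
    · rw [Bool.not_false, Bool.true_and, PySem.Set.add_eq_ite]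
      by_cases hm : pvMark line ∈ acc
      · have hc : acc.contains (pvMark line) = true := List.contains_iff_mem.mpr hm
        rw [hc, if_pos hm]
        simp
      · have hc : acc.contains (pvMark line) = false := by
          rw [Bool.eq_false_iff]; intro hcc; exact hm (List.contains_iff_mem.mp hcc)
        rw [hc, if_neg hm]
        simp
    · rw [Bool.not_true, Bool.false_and, if_neg (by simp), if_neg (by simp)]
  rw [hstep, pv_foldl_add_if, PySem.Set.update_nil_left, pv_ofList_filter]

-- B's result: the same filter of the same deduped marker list
theorem pv_B_char' (l : List (List String)) (rank : String) :
    ((l.foldl (fun d line =>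
        d.modify (pvMark line) false (fun b => b || pvHit rank line))
        PySem.Dict.empty).items.filter (fun kv => kv.2 == false)).map Prod.fst
      = (PySem.Set.ofList (l.map pvMark)).filter (fun m => !(pvAny l rank m)) := by
  set D := l.foldl (fun d line =>
      d.modify (pvMark line) false (fun b => b || pvHit rank line)) PySem.Dict.empty with hD
  have hnodup : D.keys.Nodup := by
    rw [hD]
    exact PySem.Dict.nodup_keys_foldl_modify_key l pvMark false
      (fun _ line => fun b => b || pvHit rank line) PySem.Dict.empty PySem.Dict.nodup_keys_empty
  have hkeys : D.keys = PySem.Set.ofList (l.map pvMark) := by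
    rw [hD, PySem.Dict.keys_foldl_modify_key]
    simp [PySem.Set.update_nil_left]
  have hflag : ∀ m, D.getD m false = pvAny l rank m := by
    intro m; rw [hD, pv_getD_fold]; simp
  rw [pv_items_eq_keys_map D false hnodup, List.filter_map, List.map_map, hkeys]
  have hcomp : (Prod.fst ∘ fun k => (k, D.getD k false)) = (id : String → String) := rfl
  rw [hcomp, List.map_id]
  apply List.filter_congr
  intro m _
  show ((fun kv => kv.2 == false) ∘ fun k => (k, D.getD k false)) m = !(pvAny l rank m)
  simp only [Function.comp, hflag]
  cases pvAny l rank m <;> rfl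

theorem pv_B_char (l : List (List String)) (rank : String) :
    checkrank_alt l rank
      = (PySem.Set.ofList (l.map pvMark)).filter (fun m => !(pvAny l rank m)) :=
  pv_B_char' l rank

-- ===== VERDICT (by name: the statement is the Claim_ definition above) =====
theorem checkrank_spec : Claim_equal_checkrank := by
  intro l rank _ _
  unfold Spec_checkrank
  rw [pv_A_char, pv_B_char]
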